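-- pv_equiv track=rewrite | github.com/rhender007/codesignal_problems | ElectionWinners/electionWinners.py | solution
-- ===== SOURCE A (Python) =====
-- def solution(votes, k):
--     # winner needs more votes than anyone else ie difference less than k means candidate can still win
--     max_votes=max(votes) # 5
--     min_votes_can_still_win=max_votes-k+1
--
--     # adding this to handle the case where if we have k=0 and tie
--     if k==0 and votes.count(max_votes)>1:
--         # set min votes to win to higher than the max vote
--         min_votes_can_still_win=max_votes+1
--
--     if k==0 and votes.count(max_votes)==1:
--         # win is the max here
--         min_votes_can_still_win=max_votes
--     return sum(1 for i in votes if i >= min_votes_can_still_win)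
-- ===== SOURCE B (Python) =====
-- def solution(votes, k):
--     # One pass computing the top-two values and the multiplicity of the maximum,
--     # then count candidates that can beat the best of the others with k more votes.
--     m = None   # maximum so far
--     s = None   # best value strictly below m
--     c = 0      # how many times m occurs
--     for v in votes:
--         if m is None or v > m:
--             s = m
--             m = v
--             c = 1
--         elif v == m:
--             c += 1
--         elif s is None or v > s:
--             s = v
--     total = 0
--     for v in votes:
--         if v == m and c == 1:
--             if s is None or v + k > s:
--                 total += 1
--         elif v + k > m:
--             total += 1
--     return total
-- ===== Notes on version B (the rewrite author's own statement) =====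
-- stated objective: alternative
-- what changed: B replaces A's global threshold (max-k+1 with two k==0 patch branches) by a single pass that tracks the top-two values and the maximum's multiplicity, then counts candidates whose votes plus k beat the best of the other candidates.
-- outside the precondition, e.g. on solution([10, 1], -3): A returns 0, B returns 1
import Mathlib
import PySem

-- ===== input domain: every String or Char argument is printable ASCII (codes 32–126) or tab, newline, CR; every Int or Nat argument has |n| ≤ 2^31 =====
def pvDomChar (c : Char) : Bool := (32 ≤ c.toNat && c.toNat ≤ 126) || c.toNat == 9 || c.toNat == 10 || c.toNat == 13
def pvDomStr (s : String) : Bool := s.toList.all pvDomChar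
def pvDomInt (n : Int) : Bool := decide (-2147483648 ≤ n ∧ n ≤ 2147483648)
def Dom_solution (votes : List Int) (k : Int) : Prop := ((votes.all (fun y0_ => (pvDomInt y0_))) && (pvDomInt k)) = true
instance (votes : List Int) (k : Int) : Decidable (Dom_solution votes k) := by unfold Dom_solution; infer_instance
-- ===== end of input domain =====

-- B replaces A's global threshold by a one-pass top-two/multiplicity scan; same O(n) cost, different decomposition.

-- ===== PORT A =====
def solution (votes : List Int) (k : Int) : Int :=
  match PySem.List.max? votes (fun v => v) with
  | none => 0  -- max([]) raises ValueError; excluded by Pre_solution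
  | some max_votes =>
    let t0 := max_votes - k + 1
    let t1 := if k = 0 ∧ PySem.List.count votes max_votes > 1 then max_votes + 1 else t0
    let t2 := if k = 0 ∧ PySem.List.count votes max_votes = 1 then max_votes else t1
    votes.foldl (fun acc i => if i ≥ t2 then acc + 1 else acc) 0

-- ===== PORT B =====
-- one-pass state: (maximum so far, best value strictly below it, multiplicity of the maximum)
def bStep (p : Option Int × Option Int × Int) (v : Int) : Option Int × Option Int × Int :=
  match p with
  | (m?, s, c) =>
    match m? with
    | none => (some v, s, 1)
    | some m =>
      if v > m then (some v, some m, 1)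
      else if v = m then (some m, s, c + 1)
      else
        match s with
        | none => (some m, some v, c)
        | some sv => if v > sv then (some m, some v, c) else (some m, some sv, c)

def solution_alt (votes : List Int) (k : Int) : Int :=
  match votes.foldl bStep (none, none, 0) with
  | (m?, s, c) =>
    votes.foldl (fun total v =>
      match m? with
      | none => total   -- m is still None only when votes is empty, so this loop body never runs then
      | some m =>
        if v = m ∧ c = 1 then
          match s with
          | none => total + 1
          | some sv => if v + k > sv then total + 1 else total
        else
          if v + k > m then total + 1 else total) 0

-- ===== PRECONDITION & SPEC =====
-- Pre_ excludes empty votes (A's max raises ValueError) and negative k, for which a negative number of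
-- remaining voters is meaningless and A's threshold arithmetic and B's head-to-head comparison both
-- give defensible but different answers.
def Pre_solution (votes : List Int) (k : Int) : Prop := votes ≠ [] ∧ 0 ≤ k
instance (votes : List Int) (k : Int) : Decidable (Pre_solution votes k) := by unfold Pre_solution; infer_instance

def pvWitness_solution : List Int × Int := ([3, 1, 2], 2)

def Spec_solution (votes : List Int) (k : Int) (out : Int) : Prop := out = solution_alt votes k
instance (votes : List Int) (k : Int) (out : Int) : Decidable (Spec_solution votes k out) := by unfold Spec_solution; infer_instance

-- ===== CLAIM (what is proved, stated in full; the proofs are below) =====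
def Claim_equal_solution : Prop := ∀ (votes : List Int) (k : Int), Dom_solution votes k → Pre_solution votes k → Spec_solution votes k (solution votes k)

-- ===== LEMMAS AND PROOFS =====

-- spec form of the running maximum (the value max(votes) computes)
def runMax (l : List Int) : Option Int :=
  match l with
  | [] => none
  | x :: t => some (t.foldl max x)

theorem runMax_eq_max? (l : List Int) : PySem.List.max? l (fun v => v) = runMax l := by
  cases l with
  | nil => simp [runMax, PySem.List.max?_eq_none_iff]
  | cons x t => simp [runMax, PySem.List.max?_id_cons]

theorem runMax_le (l : List Int) (m : Int) (h : runMax l = some m) : ∀ v ∈ l, v ≤ m := by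
  intro v hv
  have := PySem.List.max?_isMax (xs := l) (key := fun v => v) (by rw [runMax_eq_max?]; exact h)
  exact this v hv

theorem runMax_mem (l : List Int) (m : Int) (h : runMax l = some m) : m ∈ l := by
  have := PySem.List.max?_mem (xs := l) (key := fun v => v) (by rw [runMax_eq_max?]; exact h)
  exact this

theorem runMax_eq_none_iff (l : List Int) : runMax l = none ↔ l = [] := by
  cases l <;> simp [runMax]

theorem runMax_append_singleton (l : List Int) (a : Int) :
    runMax (l ++ [a]) = some (match runMax l with | none => a | some m => max m a) := by
  cases l with
  | nil => simp [runMax]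
  | cons x t => simp [runMax, List.foldl_append]

theorem bstate (l : List Int) (m : Int) (h : runMax l = some m) :
    l.foldl bStep (none, none, 0) =
      (some m, runMax (l.filter (fun v => decide (v < m))), (l.count m : Int)) := by
  induction l using List.reverseRecOn generalizing m with
  | nil => simp [runMax] at h
  | append_singleton l a ih =>
    rcases eq_or_ne l [] with rfl | hl
    · simp [runMax] at h
      subst h
      simp [bStep, runMax]
    · obtain ⟨m0, hm0⟩ : ∃ m0, runMax l = some m0 := by
        cases hh : runMax l with
        | none => exact absurd ((runMax_eq_none_iff l).mp hh) hl
        | some m0 => exact ⟨m0, rfl⟩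
      have hmax : m = max m0 a := by
        rw [runMax_append_singleton, hm0] at h
        simpa using h.symm
      have hle := runMax_le l m0 hm0
      rw [List.foldl_append, ih m0 hm0]
      simp only [List.foldl_cons, List.foldl_nil]
      rcases lt_trichotomy m0 a with hlt | heq | hgt
      · -- new strict maximum a
        have hma : m = a := by omega
        rw [hma]
        have hfl : l.filter (fun v => decide (v < a)) = l :=
          List.filter_eq_self.mpr (fun v hv => by have := hle v hv; simp; omega)
        have hcnt : l.count a = 0 :=
          List.count_eq_zero.mpr (fun hmem => by have := hle a hmem; omega)
        have hfa : (l ++ [a]).filter (fun v => decide (v < a)) = l := by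
          simp [List.filter_append, hfl]
        simp [bStep, hlt, hfa, hm0, List.count_append, hcnt]
      · -- a equals the old maximum
        have hma : m = m0 := by omega
        rw [hma, heq]
        rw [heq] at hm0 hle
        have hfa : (l ++ [a]).filter (fun v => decide (v < a)) =
            l.filter (fun v => decide (v < a)) := by
          simp [List.filter_append]
        simp [bStep, hfa, List.count_append]
      · -- a below the old maximum
        have hma : m = m0 := by omega
        rw [hma]
        have hane : a ≠ m0 := by omega
        have hfa : (l ++ [a]).filter (fun v => decide (v < m0)) =
            l.filter (fun v => decide (v < m0)) ++ [a] := by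
          simp [List.filter_append, hgt]
        have hcnt : (l ++ [a]).count m0 = l.count m0 := by
          simp [List.count_append, hane]
        rw [hfa, hcnt, runMax_append_singleton]
        have hnlt : ¬ m0 < a := by omega
        cases hs : runMax (l.filter (fun v => decide (v < m0))) with
        | none => simp [bStep, hnlt, hane]
        | some sv =>
          rcases le_or_gt a sv with hc | hc
          · simp [bStep, hnlt, hane, show ¬ sv < a by omega, show max sv a = sv by omega]
          · simp [bStep, hnlt, hane, hc, show max sv a = a by omega]

theorem solution_spec : Claim_equal_solution := by
  intro votes k _ hpre
  obtain ⟨hne, hk⟩ := hpre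
  obtain ⟨m, hm⟩ : ∃ m, runMax votes = some m := by
    cases hh : runMax votes with
    | none => exact absurd ((runMax_eq_none_iff votes).mp hh) hne
    | some m => exact ⟨m, rfl⟩
  have hle := runMax_le votes m hm
  have hmem := runMax_mem votes m hm
  have hcnt_pos : 0 < votes.count m := List.count_pos_iff.mpr hmem
  unfold Spec_solution solution solution_alt
  rw [runMax_eq_max?, hm, bstate votes m hm]
  simp only [PySem.List.count_eq]
  -- the two counting loops agree pointwise on elements of votes
  apply PySem.List.foldl_congr_mem'
  intro v hv total
  symm
  have hvle := hle v hv
  set s := runMax (votes.filter (fun v => decide (v < m))) with hs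
  have hs_lt : ∀ sv, s = some sv → sv < m := by
    intro sv hsv
    have := runMax_mem _ _ hsv
    have := List.of_mem_filter this
    simpa using this
  have hs_none : s = none → ∀ w ∈ votes, ¬ w < m := by
    intro hn w hw hwlt
    have hfe : votes.filter (fun v => decide (v < m)) = [] := (runMax_eq_none_iff _).mp (hs.symm.trans hn)
    have hwm : w ∈ votes.filter (fun v => decide (v < m)) := List.mem_filter.mpr ⟨hw, by simpa using hwlt⟩
    rw [hfe] at hwm
    simp at hwm
  by_cases hveq : v = m ∧ (votes.count m : Int) = 1
  · obtain ⟨rfl, hc1⟩ := hveq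
    rw [if_pos ⟨rfl, hc1⟩]
    have hcnt1 : votes.count v = 1 := by omega
    cases hsv : s with
    | none =>
      -- every element equals m, so the threshold test succeeds for v = m
      rcases eq_or_ne k 0 with rfl | hk0
      · simp [hcnt1]
      · have : ¬ (k = 0 ∧ votes.count v > 1) := by omega
        simp [hcnt1, hk0]
        omega
    | some sv =>
      have hsvlt := hs_lt sv hsv
      rcases eq_or_ne k 0 with rfl | hk0
      · simp [hcnt1]
        omega
      · simp [hcnt1, hk0]
        split_ifs <;> omega
  · rw [if_neg hveq]
    rcases eq_or_ne k 0 with rfl | hk0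
    · by_cases hc : votes.count m > 1
      · simp [hc]
        split_ifs <;> omega
      · have hcnt1 : votes.count m = 1 := by omega
        have hvne : v ≠ m := by
          intro rfl; exact hveq ⟨rfl, by omega⟩
        simp [hcnt1]
        split_ifs <;> omega
    · by_cases hc1 : votes.count m = 1 <;>
        by_cases hcg : votes.count m > 1 <;>
        simp [hk0, hc1, hcg] <;> (split_ifs <;> omega)
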